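-- pv_equiv track=rewrite | github.com/saveligulas/advent_of_code | 4_2.py | get_next_card
-- ===== SOURCE A (Python) =====
-- def get_number_of_winning_numbers(card):
--     line_words = card.split()
--     justified_list = " ".join(line_words)
--     cut_card_part = justified_list.split(":")[1]
--     winning_numbers = list(int(num) for num in cut_card_part.split(" | ")[0].lstrip().split(" "))
--     numbers_ihave = list(int(num) for num in cut_card_part.split(" | ")[1].lstrip().split(" "))
--     line_result = 0
--     for winning_num in winning_numbers:
--         if winning_num in numbers_ihave:
--             line_result += 1
--     return line_result
--
-- def get_won_cards(index, winning_numbers):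
--     cards = []
--     for i in range(index + 1, index + 1 + winning_numbers):
--         cards.append(i)
--     return cards
--
-- def get_next_card(text, card_dict=None, index=0):
--     if card_dict is None:
--         card_dict = {key: 1 for key in range(0, len(text))}
--     if index == len(text) - 1:
--         return card_dict
--     winning_numbers = get_number_of_winning_numbers(text[index])
--     cards_won = get_won_cards(index, winning_numbers)
--     for card in cards_won:
--         card_dict[card] += 1 * card_dict[index]
--     return get_next_card(text, card_dict, index + 1)
-- ===== SOURCE B (Python) =====
-- def get_number_of_winning_numbers(card):
--     body = " ".join(card.split()).split(":")[1]
--     halves = body.split(" | ")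
--     winning = [int(x) for x in halves[0].lstrip().split(" ")]
--     have = [int(x) for x in halves[1].lstrip().split(" ")]
--     return len([w for w in winning if w in have])
--
-- def get_next_card(text, card_dict=None, index=0):
--     # Staged passes: first collect every processed card's win count into a list,
--     # then propagate the counts with a plain for-loop (no recursion).
--     # Like A, this mutates a caller-supplied card_dict in place.
--     if card_dict is None:
--         card_dict = dict.fromkeys(range(0, len(text)), 1)
--     wins = []
--     i = index
--     while i != len(text) - 1:
--         wins.append(get_number_of_winning_numbers(text[i]))
--         i += 1
--     j = index
--     for w in wins:
--         for card in range(j + 1, j + 1 + w):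
--             card_dict[card] += card_dict[j]
--         j += 1
--     return card_dict
-- ===== Notes on version B (the rewrite author's own statement) =====
-- stated objective: alternative
-- what changed: Replaces A's tail recursion by staged passes: B first collects all processed cards' win counts into a list, then propagates the counts with a separate plain for-loop over that list; the parser returns len of a filtered comprehension instead of A's if-in counting loop, and the default dict is built with dict.fromkeys.
import Mathlib
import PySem

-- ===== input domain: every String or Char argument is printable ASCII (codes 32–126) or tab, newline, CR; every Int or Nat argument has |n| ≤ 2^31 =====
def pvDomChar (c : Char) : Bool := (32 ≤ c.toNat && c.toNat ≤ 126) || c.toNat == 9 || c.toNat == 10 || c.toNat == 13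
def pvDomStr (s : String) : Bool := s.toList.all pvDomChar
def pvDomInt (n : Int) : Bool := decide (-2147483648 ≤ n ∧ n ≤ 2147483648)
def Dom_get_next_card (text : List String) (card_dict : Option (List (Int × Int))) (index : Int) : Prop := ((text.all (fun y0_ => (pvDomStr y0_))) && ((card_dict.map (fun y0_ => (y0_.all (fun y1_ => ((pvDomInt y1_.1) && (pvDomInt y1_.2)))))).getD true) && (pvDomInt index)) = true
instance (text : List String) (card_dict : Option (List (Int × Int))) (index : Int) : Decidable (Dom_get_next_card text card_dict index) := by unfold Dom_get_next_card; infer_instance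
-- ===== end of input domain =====

-- B replaces A's tail recursion by staged passes: parse all processed cards' win counts into a
-- list first, then propagate with a plain loop (same forward propagation; like A it mutates a
-- caller-supplied card_dict in place — the equivalence proved here is about the return value).

-- ===== PORT A =====

-- list(int(num) for num in toks); none exactly where int() raises ValueError
def pvParseInts : List String → Option (List Int)
  | [] => some []
  | t :: ts =>
    match PySem.Int.ofStr? t, pvParseInts ts with
    | some v, some vs => some (v :: vs)
    | _, _ => none

-- port of A's get_number_of_winning_numbers; none exactly where the Python helper raises
-- (IndexError on a line without ':' or ' | ', ValueError from int()) — excluded by Pre_.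
def get_number_of_winning_numbers (card : String) : Option Int :=
  let line_words := PySem.Str.split₀ card
  let justified_list := PySem.Str.join " " line_words
  -- split? is some for every non-empty separator: the .getD [] branches below are unreachable
  match PySem.List.pyGet? ((PySem.Str.split? justified_list ":").getD []) 1 with
  | none => none
  | some cut_card_part =>
    match PySem.List.pyGet? ((PySem.Str.split? cut_card_part " | ").getD []) 0,
          PySem.List.pyGet? ((PySem.Str.split? cut_card_part " | ").getD []) 1 with
    | some w, some h =>
      match pvParseInts ((PySem.Str.split? (PySem.Str.lstrip w) " ").getD []),
            pvParseInts ((PySem.Str.split? (PySem.Str.lstrip h) " ").getD []) with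
      | some winning_numbers, some numbers_ihave =>
        some (winning_numbers.foldl
          (fun line_result winning_num =>
            if winning_num ∈ numbers_ihave then line_result + 1 else line_result) 0)
      | _, _ => none
    | _, _ => none

def get_won_cards (index : Int) (winning_numbers : Int) : List Int :=
  (PySem.List.pyRange (index + 1) (index + 1 + winning_numbers) 1).foldl
    (fun cards i => cards ++ [i]) []

-- A's {key: 1 for key in range(0, len(text))} / a provided dict
def pvInitDict (text : List String) (card_dict : Option (List (Int × Int))) : PySem.Dict Int Int :=
  match card_dict with
  | none => (PySem.List.pyRange 0 (text.length : Int) 1).foldl (fun d k => d.insert k 1) PySem.Dict.empty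
  | some l => PySem.Dict.mk l

-- A's recursion, with fuel = the exact recursion depth (len(text) - 1 - index) computed below;
-- text[index] / get_number_of_winning_numbers raising is outside Pre_: there the defaults "" / 0 stand in
def pvGoA (text : List String) : Nat → PySem.Dict Int Int → Int → PySem.Dict Int Int
  | fuel, card_dict, index =>
    if index = (text.length : Int) - 1 then card_dict
    else
      match fuel with
      | 0 => card_dict
      | f + 1 =>
        let winning_numbers := (get_number_of_winning_numbers ((PySem.List.pyGet? text index).getD "")).getD 0
        let cards_won := get_won_cards index winning_numbers
        pvGoA text f
          (cards_won.foldl (fun d card => d.modify card 0 (· + 1 * d.getD index 0)) card_dict)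
          (index + 1)

def get_next_card (text : List String) (card_dict : Option (List (Int × Int))) (index : Int) : List (Int × Int) :=
  (pvGoA text ((text.length : Int) - 1 - index).toNat (pvInitDict text card_dict) index).items

-- ===== PORT B =====

-- [int(x) for x in halves[j].lstrip().split(" ")] of B's parser; none where Python raises
def pvHalfInts (body : String) (j : Int) : Option (List Int) :=
  (PySem.List.pyGet? ((PySem.Str.split? body " | ").getD []) j).bind fun part =>
    ((PySem.Str.split? (PySem.Str.lstrip part) " ").getD []).mapM PySem.Int.ofStr?

-- B's parser: len of a filtered comprehension, Option plumbing by bind/map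
def pvWinCount (card : String) : Option Int :=
  (PySem.List.pyGet? ((PySem.Str.split? (PySem.Str.join " " (PySem.Str.split₀ card)) ":").getD []) 1).bind fun body =>
  (pvHalfInts body 0).bind fun winning =>
  (pvHalfInts body 1).map fun have_ =>
  ((winning.filter (fun w => decide (w ∈ have_))).length : Int)

-- stage 1: the while-loop collecting wins, with fuel = its exact trip count (len(text)-1-index,
-- computed below); text[i] / the parser raising is outside Pre_: the defaults "" / 0 stand in
def pvCollect (text : List String) : Nat → Int → List Int → List Int
  | fuel, i, wins =>
    if i = (text.length : Int) - 1 then wins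
    else
      match fuel with
      | 0 => wins
      | f + 1 =>
        pvCollect text f (i + 1)
          (wins ++ [(pvWinCount ((PySem.List.pyGet? text i).getD "")).getD 0])

-- stage 2: the for-loop over wins, carrying the running card index i
def pvPropagate : List Int → PySem.Dict Int Int → Int → PySem.Dict Int Int
  | [], card_dict, _ => card_dict
  | w :: ws, card_dict, i =>
    pvPropagate ws
      ((PySem.List.pyRange (i + 1) (i + 1 + w) 1).foldl
        (fun d card => d.modify card 0 (· + d.getD i 0)) card_dict)
      (i + 1)

-- dict.fromkeys(range(0, len(text)), 1) / a provided dict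
def pvInitAlt (text : List String) (card_dict : Option (List (Int × Int))) : PySem.Dict Int Int :=
  match card_dict with
  | none => PySem.Dict.mk ((PySem.List.pyRange 0 (text.length : Int) 1).map (fun k => (k, 1)))
  | some l => PySem.Dict.mk l

def get_next_card_alt (text : List String) (card_dict : Option (List (Int × Int))) (index : Int) : List (Int × Int) :=
  (pvPropagate (pvCollect text ((text.length : Int) - 1 - index).toNat index [])
    (pvInitAlt text card_dict) index).items

-- ===== PRECONDITION & SPEC =====

-- keys of the dict the loop starts from
def pvKeys (text : List String) (card_dict : Option (List (Int × Int))) : List Int :=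
  match card_dict with
  | none => PySem.List.pyRange 0 (text.length : Int) 1
  | some l => l.map Prod.fst

-- line i parses and every dict access of iteration i hits an existing key (no KeyError):
-- a shape/membership check per line, stated with library all/map/countP (it does not call the ports)
def pvLineOK (text : List String) (keys : List Int) (i : Int) : Bool :=
  let line := (PySem.List.pyGet? text i).getD ""
  let justified := PySem.Str.join " " (PySem.Str.split₀ line)
  match PySem.List.pyGet? ((PySem.Str.split? justified ":").getD []) 1 with
  | none => false
  | some cut =>
    let halves := (PySem.Str.split? cut " | ").getD []
    match PySem.List.pyGet? halves 0, PySem.List.pyGet? halves 1 with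
    | some wpart, some hpart =>
      let wt := (PySem.Str.split? (PySem.Str.lstrip wpart) " ").getD []
      let ht := (PySem.Str.split? (PySem.Str.lstrip hpart) " ").getD []
      if wt.all (fun t => (PySem.Int.ofStr? t).isSome) && ht.all (fun t => (PySem.Int.ofStr? t).isSome) then
        let hs := ht.map (fun t => (PySem.Int.ofStr? t).getD 0)
        let w : Int := (wt.countP (fun t => decide ((PySem.Int.ofStr? t).getD 0 ∈ hs)) : Nat)
        (decide (w ≤ 0) || decide (i ∈ keys)) &&
          (PySem.List.pyRange (i + 1) (i + 1 + w) 1).all (fun c => decide (c ∈ keys))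
      else false
    | _, _ => false

-- Pre_: exactly the inputs on which the Python A returns normally — index is a valid position
-- (below -len(text) the first text[index] raises IndexError) that reaches the stop value
-- len(text)-1 without passing it, every processed line parses, and every dict access hits an
-- existing key; a provided card_dict must have distinct keys (an association list with duplicate
-- keys does not denote a Python dict).
def Pre_get_next_card (text : List String) (card_dict : Option (List (Int × Int))) (index : Int) : Prop :=
  -(text.length : Int) ≤ index ∧ index ≤ (text.length : Int) - 1 ∧
  (match card_dict with | none => true | some l => decide ((l.map Prod.fst).Nodup)) = true ∧
  ∀ i ∈ PySem.List.pyRange index ((text.length : Int) - 1) 1,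
    pvLineOK text (pvKeys text card_dict) i = true
instance (text : List String) (card_dict : Option (List (Int × Int))) (index : Int) : Decidable (Pre_get_next_card text card_dict index) := by unfold Pre_get_next_card; infer_instance

def pvWitness_get_next_card : List String × (Option (List (Int × Int))) × Int :=
  (["a: 1 2 | 2 3", "b: 1 | 1", "c: 0 | 9"], (none, 0))

def Spec_get_next_card (text : List String) (card_dict : Option (List (Int × Int))) (index : Int) (out : List (Int × Int)) : Prop := out = get_next_card_alt text card_dict index
instance (text : List String) (card_dict : Option (List (Int × Int))) (index : Int) (out : List (Int × Int)) : Decidable (Spec_get_next_card text card_dict index out) := by unfold Spec_get_next_card; infer_instance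

-- ===== CLAIM (what is proved, stated in full; the proofs are below) =====
def Claim_equal_get_next_card : Prop := ∀ (text : List String) (card_dict : Option (List (Int × Int))) (index : Int), Dom_get_next_card text card_dict index → Pre_get_next_card text card_dict index → Spec_get_next_card text card_dict index (get_next_card text card_dict index)

-- ===== LEMMAS AND PROOFS =====

-- A's generator list = B's comprehension (both are the tokens' mapM over int())
lemma pvParseInts_eq_mapM (ts : List String) : pvParseInts ts = ts.mapM PySem.Int.ofStr? := by
  induction ts with
  | nil => rfl
  | cons t ts ih =>
    simp only [pvParseInts, ih, List.mapM_cons]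
    cases PySem.Int.ofStr? t <;> cases ts.mapM PySem.Int.ofStr? <;> rfl

-- A's if-in counting fold = B's len-of-filter
lemma pvCount_eq (winning have_ : List Int) :
    (winning.foldl (fun r w => if w ∈ have_ then r + 1 else r) (0 : Int))
      = ((winning.filter (fun w => decide (w ∈ have_))).length : Int) := by
  rw [← List.countP_eq_length_filter, PySem.List.foldl_ite_add_one]
  simp

-- the two parsers agree
lemma pvWinCount_eq (card : String) :
    get_number_of_winning_numbers card = pvWinCount card := by
  unfold get_number_of_winning_numbers pvWinCount pvHalfInts
  dsimp only
  cases PySem.List.pyGet? ((PySem.Str.split? (PySem.Str.join " " (PySem.Str.split₀ card)) ":").getD []) 1 with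
  | none => rfl
  | some cut =>
    simp only [Option.bind_some]
    cases h0 : PySem.List.pyGet? ((PySem.Str.split? cut " | ").getD []) 0 with
    | none =>
      cases PySem.List.pyGet? ((PySem.Str.split? cut " | ").getD []) 1 <;> rfl
    | some wpart =>
      cases h1 : PySem.List.pyGet? ((PySem.Str.split? cut " | ").getD []) 1 with
      | none =>
        simp only [Option.bind_some, ← pvParseInts_eq_mapM]
        cases pvParseInts ((PySem.Str.split? (PySem.Str.lstrip wpart) " ").getD []) <;> rfl
      | some hpart =>
        simp only [Option.bind_some, ← pvParseInts_eq_mapM]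
        cases pvParseInts ((PySem.Str.split? (PySem.Str.lstrip wpart) " ").getD []) with
        | none => rfl
        | some winning =>
          simp only [Option.bind_some]
          cases pvParseInts ((PySem.Str.split? (PySem.Str.lstrip hpart) " ").getD []) with
          | none => rfl
          | some have_ => simp only [Option.map_some, pvCount_eq]

-- A's recursive step updates the dict exactly as B's loop iteration: cards_won is literally
-- the range, and 1 * x = x.
lemma pvStep_eq (d : PySem.Dict Int Int) (i : Int) (w : Int) :
    (get_won_cards i w).foldl (fun d card => d.modify card 0 (· + 1 * d.getD i 0)) d
      = (PySem.List.pyRange (i + 1) (i + 1 + w) 1).foldl (fun d card => d.modify card 0 (· + d.getD i 0)) d := by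
  simp only [get_won_cards, PySem.List.foldl_append_singleton_eq_self, List.nil_append, one_mul]

-- both default initialisations build the same dict
lemma pvInit_eq (text : List String) (card_dict : Option (List (Int × Int))) :
    pvInitDict text card_dict = pvInitAlt text card_dict := by
  unfold pvInitDict pvInitAlt
  cases card_dict with
  | some l => rfl
  | none =>
    apply PySem.Dict.ext
    rw [PySem.Dict.items_foldl_insert_fresh (k := fun a => a) (v := fun _ => (1 : Int))]
    · rfl
    · intro a _; exact PySem.Dict.contains_empty a
    · simpa using PySem.List.nodup_pyRange_one 0 (text.length : Int)

-- proof helper: the list stage 1 collects, as a map over the range of processed indices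
def pvWins (text : List String) (index : Int) : List Int :=
  (PySem.List.pyRange index ((text.length : Int) - 1) 1).map
    (fun i => (pvWinCount ((PySem.List.pyGet? text i).getD "")).getD 0)

-- with fuel = its exact trip count, the while-loop collects exactly pvWins
lemma pvCollect_eq (text : List String) :
    ∀ (k : Nat) (i : Int) (wins : List Int),
      i ≤ (text.length : Int) - 1 → ((text.length : Int) - 1 - i).toNat = k →
      pvCollect text k i wins = wins ++ pvWins text i := by
  intro k
  induction k with
  | zero =>
    intro i wins hle hk
    have hi : i = (text.length : Int) - 1 := by omega
    rw [pvCollect]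
    simp [hi, pvWins]
  | succ f ih =>
    intro i wins hle hk
    have hlt : i < (text.length : Int) - 1 := by omega
    have hne : i ≠ (text.length : Int) - 1 := by omega
    rw [pvCollect]
    simp only [hne, if_false]
    rw [ih (i + 1) _ (by omega) (by omega)]
    unfold pvWins
    rw [PySem.List.pyRange_one_cons hlt, List.map_cons, List.append_assoc, List.singleton_append]

-- with fuel = the exact recursion depth, A's recursion is B's staged parse-then-propagate
lemma pvGoA_eq_pvPropagate (text : List String) :
    ∀ (k : Nat) (i : Int) (d : PySem.Dict Int Int),
      i ≤ (text.length : Int) - 1 → ((text.length : Int) - 1 - i).toNat = k →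
      pvGoA text k d i = pvPropagate (pvWins text i) d i := by
  intro k
  induction k with
  | zero =>
    intro i d hle hk
    have hi : i = (text.length : Int) - 1 := by omega
    rw [pvGoA]
    simp [hi, pvWins, pvPropagate]
  | succ f ih =>
    intro i d hle hk
    have hlt : i < (text.length : Int) - 1 := by omega
    have hne : i ≠ (text.length : Int) - 1 := by omega
    rw [pvGoA]
    simp only [hne, if_false]
    rw [pvStep_eq, pvWinCount_eq]
    have hcons : PySem.List.pyRange i ((text.length : Int) - 1) 1
        = i :: PySem.List.pyRange (i + 1) ((text.length : Int) - 1) 1 :=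
      PySem.List.pyRange_one_cons hlt
    rw [show pvWins text i
        = ((pvWinCount ((PySem.List.pyGet? text i).getD "")).getD 0) :: pvWins text (i + 1) by
      unfold pvWins; rw [hcons, List.map_cons]]
    rw [pvPropagate]
    exact ih (i + 1) _ (by omega) (by omega)

-- ===== VERDICT (by name: the statement is the Claim_ definition above) =====
theorem get_next_card_spec : Claim_equal_get_next_card := by
  intro text card_dict index _ hpre
  unfold Spec_get_next_card get_next_card get_next_card_alt
  rw [pvInit_eq, pvCollect_eq text _ index [] hpre.2.1 rfl, List.nil_append,
    pvGoA_eq_pvPropagate text _ index _ hpre.2.1 rfl]
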